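-- pv_equiv track=rewrite | github.com/neo4nature/neo4nature | ma/core/storage_assemble.py | _locate_start
-- ===== SOURCE A (Python) =====
-- from typing import Dict, Generator, List, Optional, Tuple
--
-- def _locate_start(chunks: List[str], sizes: List[int], start: int) -> Tuple[int, int]:
--     """Return (chunk_index, offset_in_chunk) for byte position start."""
--     if start <= 0:
--         return (0, 0)
--     pos = 0
--     for i, sz in enumerate(sizes):
--         if pos + sz > start:
--             return (i, start - pos)
--         pos += sz
--     return (len(chunks), 0)
-- ===== SOURCE B (Python) =====
-- def _locate_start(chunks, sizes, start):
--     """Return (chunk_index, offset_in_chunk) for byte position start."""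
--     if start <= 0:
--         return (0, 0)
--     cum = []
--     tot = 0
--     for sz in sizes:
--         tot += sz
--         cum.append(tot)
--     hit = next((i for i, c in enumerate(cum) if c > start), None)
--     if hit is None:
--         return (len(chunks), 0)
--     return (hit, start - cum[hit] + sizes[hit])
-- ===== Notes on version B (the rewrite author's own statement) =====
-- stated objective: alternative
-- what changed: Replaces A's fused position-accumulator loop by a prefix-sum table built once plus a separate search for the first prefix exceeding start, recovering the offset from the table entry.
import Mathlib
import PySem

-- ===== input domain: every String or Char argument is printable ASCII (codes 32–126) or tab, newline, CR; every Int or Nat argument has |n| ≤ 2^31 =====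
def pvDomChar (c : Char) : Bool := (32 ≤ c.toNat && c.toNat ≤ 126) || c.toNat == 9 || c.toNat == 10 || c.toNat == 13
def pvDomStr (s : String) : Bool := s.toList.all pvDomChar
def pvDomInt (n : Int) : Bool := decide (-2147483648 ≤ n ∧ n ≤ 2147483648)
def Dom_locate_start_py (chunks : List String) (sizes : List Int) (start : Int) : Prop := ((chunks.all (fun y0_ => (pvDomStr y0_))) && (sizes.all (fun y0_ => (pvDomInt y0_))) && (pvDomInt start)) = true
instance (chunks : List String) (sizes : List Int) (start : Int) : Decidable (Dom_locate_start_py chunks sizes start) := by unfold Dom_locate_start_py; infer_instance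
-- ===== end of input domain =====

-- ===== PORT A =====
-- B builds a prefix-sum table once and searches it for the first prefix exceeding
-- start, instead of A's fused position-accumulator loop (alternative decomposition,
-- same cost). Neither mutates its arguments.
def aLoop (chunks : List String) (start : Int) : List Int → Int → Int → Int × Int
  | [], _i, _pos => ((chunks.length : Int), 0)
  | sz :: rest, i, pos =>
      if pos + sz > start then (i, start - pos) else aLoop chunks start rest (i + 1) (pos + sz)

def locate_start_py (chunks : List String) (sizes : List Int) (start : Int) : Int × Int :=
  if start ≤ 0 then (0, 0) else aLoop chunks start sizes 0 0

-- ===== PORT B =====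
-- 'for sz in sizes: tot += sz; cum.append(tot)'
def buildCum (tot : Int) : List Int → List Int
  | [] => []
  | sz :: rest => (tot + sz) :: buildCum (tot + sz) rest

-- 'next((i for i, c in enumerate(cum) if c > start), None)', counter carried explicitly
def firstGt (start : Int) : List Int → Nat → Option Nat
  | [], _ => none
  | c :: rest, i => if c > start then some i else firstGt start rest (i + 1)

def locate_start_py_alt (chunks : List String) (sizes : List Int) (start : Int) : Int × Int :=
  if start ≤ 0 then (0, 0)
  else
    let cum := buildCum 0 sizes
    match firstGt start cum 0 with
    | none => ((chunks.length : Int), 0)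
    -- cum.getD / sizes.getD are exact: hit < cum.length = sizes.length
    | some hit => ((hit : Int), start - cum.getD hit 0 + sizes.getD hit 0)

-- ===== PRECONDITION & SPEC =====
def Spec_locate_start_py (chunks : List String) (sizes : List Int) (start : Int) (out : Int × Int) : Prop := out = locate_start_py_alt chunks sizes start
instance (chunks : List String) (sizes : List Int) (start : Int) (out : Int × Int) : Decidable (Spec_locate_start_py chunks sizes start out) := by unfold Spec_locate_start_py; infer_instance

-- ===== CLAIM =====
def Claim_equal_locate_start_py : Prop := ∀ (chunks : List String) (sizes : List Int) (start : Int), Dom_locate_start_py chunks sizes start → Spec_locate_start_py chunks sizes start (locate_start_py chunks sizes start)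

-- ===== LEMMAS AND PROOFS =====

-- least index of cum exceeding start (= cum.length if none)
def lidx (start : Int) : List Int → Nat
  | [] => 0
  | c :: r => if c > start then 0 else lidx start r + 1

theorem lidx_le (start : Int) (l : List Int) : lidx start l ≤ l.length := by
  induction l with
  | nil => simp [lidx]
  | cons c r ih => simp only [lidx, List.length_cons]; split <;> omega

theorem firstGt_eq (start : Int) (l : List Int) :
    ∀ i, firstGt start l i = if lidx start l < l.length then some (i + lidx start l) else none := by
  induction l with
  | nil => intro i; simp [firstGt, lidx]
  | cons c r ih =>
    intro i
    by_cases hc : c > start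
    · simp [firstGt, lidx, hc]
    · have := lidx_le start r
      simp only [firstGt, lidx, if_neg hc, List.length_cons, ih (i + 1)]
      split_ifs with h1 h2 h2
      · congr 1; omega
      · omega
      · omega
      · rfl

theorem aLoop_eq (chunks : List String) (start : Int) (l : List Int) :
    ∀ (i pos : Int),
      aLoop chunks start l i pos =
        if lidx start (buildCum pos l) < l.length then
          (i + (lidx start (buildCum pos l) : Int),
           start - (buildCum pos l).getD (lidx start (buildCum pos l)) 0
                 + l.getD (lidx start (buildCum pos l)) 0)
        else ((chunks.length : Int), 0) := by
  induction l with
  | nil => intro i pos; simp [aLoop, buildCum, lidx]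
  | cons sz rest ih =>
    intro i pos
    by_cases h : pos + sz > start
    · simp only [aLoop, buildCum, lidx, if_pos h, List.length_cons, List.getD_cons_zero]
      rw [if_pos (by omega)]
      simp only [Prod.ext_iff]
      constructor
      · push_cast; ring
      · ring
    · simp only [aLoop, buildCum, lidx, if_neg h, List.length_cons, List.getD_cons_succ]
      rw [ih (i + 1) (pos + sz)]
      split_ifs with h1 h2 h2
      · simp only [Prod.ext_iff, and_true]
        push_cast; ring
      · omega
      · omega
      · rfl

theorem buildCum_length (tot : Int) (l : List Int) : (buildCum tot l).length = l.length := by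
  induction l generalizing tot with
  | nil => rfl
  | cons a r ih => simp [buildCum, ih]

-- ===== VERDICT =====
theorem locate_start_py_spec : Claim_equal_locate_start_py := by
  intro chunks sizes start _
  unfold Spec_locate_start_py locate_start_py locate_start_py_alt
  by_cases hs : start ≤ 0
  · simp [hs]
  · simp only [if_neg hs]
    have hc : (buildCum 0 sizes).length = sizes.length := buildCum_length _ _
    rw [aLoop_eq, firstGt_eq, hc]
    split_ifs with h
    · simp
    · rfl
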